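-- pv_equiv track=rewrite | github.com/Atiqur-ra/OCR | MAIN2.py | extract_passport_fields
-- ===== SOURCE A (Python) =====
-- def extract_passport_fields(llm_output: str) -> dict:
--     passport_schema = {
--     "Surname": "",
--     "Given Names": "",
--     "Nationality": "",
--     "Place of Birth": "",
--     "Date of Birth": "",
--     "Date of Issue": "",
--     "Date of Expiration": "",
--     "Passport Number": ""
--     }
--
--     # Split lines and process key-value pairs
--     for line in llm_output.split("\n"):
--         if ": " in line:
--             key, value = line.split(": ", 1)  # Split only at first occurrence
--
--             # Clean the key by removing any leading '-'
--             key = key.lstrip("- ").strip()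
--             if key in passport_schema:
--                 passport_schema[key] = value.strip()
--
--     return passport_schema
-- ===== SOURCE B (Python) =====
-- def extract_passport_fields(llm_output: str) -> dict:
--     # Field-driven, back-to-front: for each schema field, scan the lines from
--     # the END and take the first (i.e. last-in-file) matching value -> same
--     # last-wins semantics as A, but with no mutable dict at all.
--     lines = llm_output.split("\n")
--
--     def value_for(field):
--         for line in reversed(lines):
--             if ": " in line:
--                 key, value = line.split(": ", 1)
--                 if key.lstrip("- ").strip() == field:
--                     return value.strip()
--         return ""
--
--     return {field: value_for(field)
--             for field in ["Surname", "Given Names", "Nationality",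
--                           "Place of Birth", "Date of Birth", "Date of Issue",
--                           "Date of Expiration", "Passport Number"]}
-- ===== Notes on version B (the rewrite author's own statement) =====
-- stated objective: alternative
-- what changed: A makes one line-driven pass mutating a pre-built 8-key schema dict (last duplicate overwrites); B uses no dict at all: for each of the eight fields it scans the lines back-to-front and returns the first match found (= last in file), defaulting to ''.
import Mathlib
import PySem

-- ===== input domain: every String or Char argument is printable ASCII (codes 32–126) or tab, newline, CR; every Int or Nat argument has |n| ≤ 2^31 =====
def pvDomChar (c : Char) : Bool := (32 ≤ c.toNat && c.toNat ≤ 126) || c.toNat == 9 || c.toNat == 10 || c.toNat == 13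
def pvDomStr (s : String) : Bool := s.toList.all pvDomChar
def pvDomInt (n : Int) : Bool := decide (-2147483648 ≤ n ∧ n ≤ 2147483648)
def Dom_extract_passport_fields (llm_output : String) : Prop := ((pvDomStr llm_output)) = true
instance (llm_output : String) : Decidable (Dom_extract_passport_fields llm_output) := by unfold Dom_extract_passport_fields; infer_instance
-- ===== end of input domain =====

-- B drops A's mutable schema dict entirely: for each of the eight fields it scans the
-- lines back-to-front and takes the first match (= last in file), defaulting to ""
-- (objective: alternative decomposition, same linear cost).

-- shared primitive: key.lstrip("- ").strip() — lstrip("- ") ported by hand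
-- (drop leading '-' and ' ' characters; exact for Python's str.lstrip(chars))
def cleanKey (s : String) : String :=
  PySem.Str.strip (String.ofList (s.toList.dropWhile (fun c => c == '-' || c == ' ')))

-- ===== PORT A =====
def schemaInit : PySem.Dict String String :=
  ⟨[("Surname", ""), ("Given Names", ""), ("Nationality", ""), ("Place of Birth", ""),
    ("Date of Birth", ""), ("Date of Issue", ""), ("Date of Expiration", ""), ("Passport Number", "")]⟩

def stepA (d : PySem.Dict String String) (line : String) : PySem.Dict String String :=
  if PySem.Str.isIn ": " line then
    match PySem.Str.splitMax? line ": " 1 with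
    | some [key, value] =>
        let k := cleanKey key
        if d.contains k then d.insert k (PySem.Str.strip value) else d
    | _ => d  -- unreachable: splitMax? with nonempty sep and maxsplit 1 yields 1 or 2 pieces
  else d

def extract_passport_fields (llm_output : String) : List (String × String) :=
  (((PySem.Chars.splitOn llm_output.toList ['\n']).map String.ofList).foldl stepA schemaInit).items

-- ===== PORT B =====
def schemaKeys : List String :=
  ["Surname", "Given Names", "Nationality", "Place of Birth",
   "Date of Birth", "Date of Issue", "Date of Expiration", "Passport Number"]

-- value_for: walk the (already reversed) list of lines, return the first matching value
def scanRev (ls : List String) (field : String) : String :=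
  match ls with
  | [] => ""
  | line :: rest =>
    if PySem.Str.isIn ": " line then
      match PySem.Str.splitMax? line ": " 1 with
      | some [key, value] =>
          if cleanKey key == field then PySem.Str.strip value else scanRev rest field
      | _ => scanRev rest field  -- unreachable, as in stepA
    else scanRev rest field

def extract_passport_fields_alt (llm_output : String) : List (String × String) :=
  let lines := (PySem.Chars.splitOn llm_output.toList ['\n']).map String.ofList
  schemaKeys.map (fun field => (field, scanRev lines.reverse field))

-- ===== PRECONDITION & SPEC =====
def Spec_extract_passport_fields (llm_output : String) (out : List (String × String)) : Prop := out = extract_passport_fields_alt llm_output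
instance (llm_output : String) (out : List (String × String)) : Decidable (Spec_extract_passport_fields llm_output out) := by unfold Spec_extract_passport_fields; infer_instance

-- ===== CLAIM (what is proved, stated in full; the proofs are below) =====
def Claim_equal_extract_passport_fields : Prop := ∀ (llm_output : String), Dom_extract_passport_fields llm_output → Spec_extract_passport_fields llm_output (extract_passport_fields llm_output)

-- ===== LEMMAS AND PROOFS =====

-- proof-side bridge: the unrestricted-index fold (A without the schema filter)
def stepB (d : PySem.Dict String String) (line : String) : PySem.Dict String String :=
  if PySem.Str.isIn ": " line then
    match PySem.Str.splitMax? line ": " 1 with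
    | some [key, value] => d.insert (cleanKey key) (PySem.Str.strip value)
    | _ => d
  else d

-- proof-side: what one line contributes to a field, as an Option
def checkLine (line field : String) : Option String :=
  if PySem.Str.isIn ": " line then
    match PySem.Str.splitMax? line ": " 1 with
    | some [key, value] =>
        if cleanKey key == field then some (PySem.Str.strip value) else none
    | _ => none
  else none

-- proof-side: first match in a list of lines
def findRev (ls : List String) (field : String) : Option String :=
  match ls with
  | [] => none
  | line :: rest =>
    match checkLine line field with
    | some v => some v
    | none => findRev rest field

-- the schema-shaped view of an index dict
def shape (p : PySem.Dict String String) : PySem.Dict String String :=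
  ⟨schemaKeys.map (fun k => (k, p.getD k ""))⟩

lemma contains_shape (p : PySem.Dict String String) (k : String) :
    (shape p).contains k = schemaKeys.contains k := by
  simp [shape, PySem.Dict.contains, List.any_map, Function.comp_def, BEq.comm,
    List.any_beq]

lemma shape_insert_mem (p : PySem.Dict String String) (k : String) (v : String)
    (hk : k ∈ schemaKeys) : (shape p).insert k v = shape (p.insert k v) := by
  have hc : (shape p).contains k = true := by
    rw [contains_shape]; exact List.elem_eq_true_of_mem hk
  have hins : (shape p).insert k v =
      ⟨(shape p).items.map (fun q => if q.1 == k then (k, v) else q)⟩ := by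
    unfold PySem.Dict.insert; rw [if_pos hc]
  rw [hins]
  simp only [shape, List.map_map]
  congr 1
  apply List.map_congr_left
  intro a _
  by_cases h : a = k
  · subst h; simp
  · simp [PySem.Dict.getD_insert, h]

lemma shape_insert_not_mem (p : PySem.Dict String String) (k : String) (v : String)
    (hk : k ∉ schemaKeys) : shape (p.insert k v) = shape p := by
  simp only [shape]
  congr 1
  apply List.map_congr_left
  intro a ha
  have : a ≠ k := fun h => hk (h ▸ ha)
  simp [PySem.Dict.getD_insert, this]

lemma stepA_shape (p : PySem.Dict String String) (line : String) :
    stepA (shape p) line = shape (stepB p line) := by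
  unfold stepA stepB
  by_cases h : PySem.Str.isIn ": " line = true
  · simp only [h, if_true]
    rcases hs : PySem.Str.splitMax? line ": " 1 with _ | ⟨_ | ⟨key, _ | ⟨value, _ | _⟩⟩⟩ <;>
      simp only []
    by_cases hk : cleanKey key ∈ schemaKeys
    · rw [contains_shape]
      simp only [List.elem_eq_true_of_mem hk, if_true]
      exact shape_insert_mem p _ _ hk
    · rw [contains_shape]
      have hkc : schemaKeys.contains (cleanKey key) = false := by simpa using hk
      rw [hkc]
      simp only [Bool.false_eq_true, if_false]
      exact (shape_insert_not_mem p _ _ hk).symm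
  · simp only [Bool.not_eq_true] at h
    simp only [h, Bool.false_eq_true, if_false]

lemma foldl_shape (lines : List String) (p : PySem.Dict String String) :
    lines.foldl stepA (shape p) = shape (lines.foldl stepB p) := by
  induction lines generalizing p with
  | nil => rfl
  | cons l t ih => simp only [List.foldl_cons, stepA_shape, ih]

lemma schemaInit_eq : schemaInit = shape PySem.Dict.empty := by decide

lemma stepB_getD (p : PySem.Dict String String) (line k : String) (d : String) :
    (stepB p line).getD k d = (checkLine line k).getD (p.getD k d) := by
  unfold stepB checkLine
  by_cases h : PySem.Str.isIn ": " line = true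
  · simp only [h, if_true]
    rcases hs : PySem.Str.splitMax? line ": " 1 with _ | ⟨_ | ⟨key, _ | ⟨value, _ | _⟩⟩⟩ <;>
      simp only [Option.getD]
    by_cases hk : cleanKey key = k
    · subst hk; simp
    · have : k ≠ cleanKey key := fun h' => hk h'.symm
      simp [PySem.Dict.getD_insert, this, hk]
  · simp only [Bool.not_eq_true] at h
    have h2 : PySem.Chars.isIn [':', ' '] line.toList = false := h
    simp [h2]

lemma findRev_append (a b : List String) (k : String) (d : String) :
    (findRev (a ++ b) k).getD d = (findRev a k).getD ((findRev b k).getD d) := by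
  induction a with
  | nil => simp [findRev]
  | cons l t ih =>
    simp only [List.cons_append, findRev]
    cases checkLine l k <;> simp [ih]

lemma foldl_stepB_getD (lines : List String) (p : PySem.Dict String String) (k d : String) :
    (lines.foldl stepB p).getD k d = (findRev lines.reverse k).getD (p.getD k d) := by
  induction lines generalizing p with
  | nil => simp [findRev]
  | cons l t ih =>
    simp only [List.foldl_cons, List.reverse_cons]
    rw [ih, findRev_append, stepB_getD]
    cases hc : checkLine l k <;> simp [findRev, hc]

lemma scanRev_eq_findRev (ls : List String) (k : String) :
    scanRev ls k = (findRev ls k).getD "" := by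
  induction ls with
  | nil => rfl
  | cons l t ih =>
    unfold scanRev findRev checkLine
    by_cases h : PySem.Str.isIn ": " l = true
    · simp only [h, if_true]
      rcases hs : PySem.Str.splitMax? l ": " 1 with _ | ⟨_ | ⟨key, _ | ⟨value, _ | _⟩⟩⟩ <;>
        simp only [ih]
      by_cases hk : cleanKey key == k <;> simp [hk]
    · simp only [Bool.not_eq_true] at h
      have h2 : PySem.Chars.isIn [':', ' '] l.toList = false := h
      simp [h2, ih]

-- ===== VERDICT (by name: the statement is the Claim_ definition above) =====
theorem extract_passport_fields_spec : Claim_equal_extract_passport_fields := by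
  intro s _
  unfold Spec_extract_passport_fields extract_passport_fields extract_passport_fields_alt
  rw [schemaInit_eq, foldl_shape]
  simp only [shape]
  apply List.map_congr_left
  intro k _
  rw [foldl_stepB_getD, scanRev_eq_findRev]
  simp [PySem.Dict.getD, PySem.Dict.get?, PySem.Dict.empty]
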